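-- pv_equiv track=rewrite | github.com/Dima-dev-front/AI-NEWS | bot.py | collapse_to_two_sentences
-- ===== SOURCE A (Python) =====
-- def collapse_to_two_sentences(text: str, max_chars: int = 400) -> str:
-- 	if not text:
-- 		return ""
-- 	text = text.strip()
-- 	# Simple sentence split by . ! ?
-- 	sentences = []
-- 	tmp = ""
-- 	for ch in text:
-- 		tmp += ch
-- 		if ch in ".!?":
-- 			sentences.append(tmp.strip())
-- 			tmp = ""
-- 	if tmp.strip():
-- 		sentences.append(tmp.strip())
-- 	short = " ".join(sentences[:2]).strip()
-- 	if not short: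
-- 		short = text
-- 	if len(short) > max_chars:
-- 		short = short[: max_chars - 3].rstrip() + "..."
-- 	return short
-- ===== SOURCE B (Python) =====
-- def _first_sentence(t):
--     # first chunk up to and including the first . ! ? delimiter, and the rest
--     for i, ch in enumerate(t):
--         if ch in ".!?":
--             return t[: i + 1], t[i + 1:]
--     return t, ""
--
--
-- def collapse_to_two_sentences(text: str, max_chars: int = 400) -> str:
--     if not text:
--         return ""
--     text = text.strip()
--     chunk1, rest = _first_sentence(text)
--     s1 = chunk1.strip()
--     s2 = _first_sentence(rest)[0].strip()
--     short = " ".join(s for s in (s1, s2) if s)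
--     if not short:
--         short = text
--     if len(short) > max_chars:
--         short = short[: max_chars - 3].rstrip() + "..."
--     return short
-- ===== Notes on version B (the rewrite author's own statement) =====
-- stated objective: faster
-- what changed: Replaces the char-by-char accumulator that builds the full sentence list with a helper that extracts just the first two delimiter-terminated chunks by index (find-and-slice), never materialising later sentences or quadratic tmp-string growth.
import Mathlib
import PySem

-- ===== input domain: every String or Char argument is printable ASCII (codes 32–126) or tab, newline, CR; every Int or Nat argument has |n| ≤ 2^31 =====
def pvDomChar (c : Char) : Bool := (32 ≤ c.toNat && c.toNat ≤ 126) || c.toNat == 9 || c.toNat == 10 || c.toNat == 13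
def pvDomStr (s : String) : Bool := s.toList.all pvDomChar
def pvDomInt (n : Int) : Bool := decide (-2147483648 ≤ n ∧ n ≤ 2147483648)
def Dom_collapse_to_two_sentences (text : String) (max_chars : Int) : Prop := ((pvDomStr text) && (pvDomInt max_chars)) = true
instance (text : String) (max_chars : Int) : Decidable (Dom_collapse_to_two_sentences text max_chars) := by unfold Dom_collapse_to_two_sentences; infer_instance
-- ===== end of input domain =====

-- B extracts only the first two delimiter-terminated chunks by find-and-slice instead of
-- building the full sentence list with a char-by-char accumulator; same return value.

-- ===== PORT A =====
def collapse_to_two_sentences (text : String) (max_chars : Int) : String :=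
  if text = "" then ""
  else
    let t := PySem.Chars.strip text.toList
    let st := t.foldl (fun (st : List (List Char) × List Char) ch =>
        let tmp := st.2 ++ [ch]
        if ['.', '!', '?'].contains ch then (st.1 ++ [PySem.Chars.strip tmp], [])
        else (st.1, tmp)) ([], [])
    let sentences := if PySem.Chars.strip st.2 ≠ [] then st.1 ++ [PySem.Chars.strip st.2] else st.1
    let short := PySem.Chars.strip (PySem.Chars.join [' '] (PySem.List.slice sentences none (some 2)))
    let short := if short = [] then t else short
    let short := if (short.length : Int) > max_chars
      then PySem.Chars.rstrip (PySem.List.slice short none (some (max_chars - 3))) ++ ['.', '.', '.']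
      else short
    String.ofList short

-- ===== PORT B =====
-- first chunk up to and including the first . ! ? delimiter (found by index), and the rest
def pvSplitFirst (t : List Char) : List Char × List Char :=
  match t.findIdx? (fun c => ['.', '!', '?'].contains c) with
  | some i => (t.take (i + 1), t.drop (i + 1))
  | none => (t, [])

def collapse_to_two_sentences_alt (text : String) (max_chars : Int) : String :=
  if text = "" then ""
  else
    let t := PySem.Chars.strip text.toList
    let p1 := pvSplitFirst t
    let s1 := PySem.Chars.strip p1.1
    let s2 := PySem.Chars.strip (pvSplitFirst p1.2).1
    let short := PySem.Chars.join [' '] ([s1, s2].filter (fun s => s ≠ []))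
    let short := if short = [] then t else short
    let short := if (short.length : Int) > max_chars
      then PySem.Chars.rstrip (PySem.List.slice short none (some (max_chars - 3))) ++ ['.', '.', '.']
      else short
    String.ofList short

-- ===== PRECONDITION & SPEC =====
def Spec_collapse_to_two_sentences (text : String) (max_chars : Int) (out : String) : Prop := out = collapse_to_two_sentences_alt text max_chars
instance (text : String) (max_chars : Int) (out : String) : Decidable (Spec_collapse_to_two_sentences text max_chars out) := by unfold Spec_collapse_to_two_sentences; infer_instance

-- ===== CLAIM (what is proved, stated in full; the proofs are below) =====
def Claim_equal_collapse_to_two_sentences : Prop := ∀ (text : String) (max_chars : Int), Dom_collapse_to_two_sentences text max_chars → Spec_collapse_to_two_sentences text max_chars (collapse_to_two_sentences text max_chars)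

-- ===== LEMMAS AND PROOFS =====

-- abbreviations for the proofs
def pvDelim (c : Char) : Bool := ['.', '!', '?'].contains c

def pvStepA (st : List (List Char) × List Char) (ch : Char) : List (List Char) × List Char :=
  let tmp := st.2 ++ [ch]
  if ['.', '!', '?'].contains ch then (st.1 ++ [PySem.Chars.strip tmp], [])
  else (st.1, tmp)

lemma pvStepA_pos (st : List (List Char) × List Char) (ch : Char) (h : pvDelim ch = true) :
    pvStepA st ch = (st.1 ++ [PySem.Chars.strip (st.2 ++ [ch])], []) := by
  unfold pvStepA
  unfold pvDelim at h
  simp only [h, if_true]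

lemma pvStepA_neg (st : List (List Char) × List Char) (ch : Char) (h : pvDelim ch = false) :
    pvStepA st ch = (st.1, st.2 ++ [ch]) := by
  unfold pvStepA
  unfold pvDelim at h
  simp only [h, Bool.false_eq_true, if_false]

lemma pvSplitFirst_cons (c : Char) (cs : List Char) :
    pvSplitFirst (c :: cs) =
      if pvDelim c then ([c], cs)
      else (c :: (pvSplitFirst cs).1, (pvSplitFirst cs).2) := by
  unfold pvSplitFirst pvDelim
  rw [List.findIdx?_cons]
  cases h : ['.', '!', '?'].contains c with
  | true => rw [if_pos rfl]; simp
  | false =>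
    rw [if_neg (by simp)]
    cases hf : cs.findIdx? (fun c => ['.', '!', '?'].contains c) with
    | none => simp
    | some i => simp [List.take_succ_cons, List.drop_succ_cons]

-- the A-loop: accumulator only grows by appending
lemma pvFoldA_mono (t : List Char) : ∀ (acc : List (List Char)) (pre : List Char),
    t.foldl pvStepA (acc, pre) =
      (acc ++ (t.foldl pvStepA ([], pre)).1, (t.foldl pvStepA ([], pre)).2) := by
  induction t with
  | nil => intro acc pre; simp
  | cons c cs ih =>
    intro acc pre
    cases hc : pvDelim c with
    | true =>
      simp only [List.foldl_cons, pvStepA_pos _ _ hc, List.nil_append]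
      rw [ih (acc ++ [PySem.Chars.strip (pre ++ [c])]) [],
          ih [PySem.Chars.strip (pre ++ [c])] []]
      simp
    | false =>
      simp only [List.foldl_cons, pvStepA_neg _ _ hc]
      exact ih acc (pre ++ [c])

-- the A-loop on a delimiter-free list just extends tmp
lemma pvFoldA_no_delim (t : List Char) (h : t.any pvDelim = false) :
    ∀ (acc : List (List Char)) (pre : List Char),
      t.foldl pvStepA (acc, pre) = (acc, pre ++ t) := by
  induction t with
  | nil => intro acc pre; simp
  | cons c cs ih =>
    intro acc pre
    simp only [List.any_cons, Bool.or_eq_false_iff] at h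
    simp only [List.foldl_cons, pvStepA_neg _ _ h.1]
    rw [ih h.2 acc (pre ++ [c])]
    simp

-- the A-loop consumes exactly the first chunk
lemma pvFoldA_delim (t : List Char) (h : t.any pvDelim = true) :
    ∀ (acc : List (List Char)) (pre : List Char),
      t.foldl pvStepA (acc, pre) =
        (pvSplitFirst t).2.foldl pvStepA
          (acc ++ [PySem.Chars.strip (pre ++ (pvSplitFirst t).1)], []) := by
  induction t with
  | nil => simp at h
  | cons c cs ih =>
    intro acc pre
    rw [pvSplitFirst_cons]
    cases hc : pvDelim c with
    | true =>
      rw [if_pos rfl]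
      simp only [List.foldl_cons, pvStepA_pos _ _ hc]
    | false =>
      have hcs : cs.any pvDelim = true := by
        simp only [List.any_cons, hc, Bool.false_or] at h; exact h
      rw [if_neg (by simp)]
      simp only [List.foldl_cons, pvStepA_neg _ _ hc]
      rw [ih hcs acc (pre ++ [c])]
      simp

-- first chunk of a list with a delimiter ends in that delimiter
lemma pvSplitFirst_last (t : List Char) (h : t.any pvDelim = true) :
    ∃ w c, (pvSplitFirst t).1 = w ++ [c] ∧ pvDelim c = true := by
  induction t with
  | nil => simp at h
  | cons x xs ih =>
    rw [pvSplitFirst_cons]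
    cases hx : pvDelim x with
    | true => exact ⟨[], x, by simp, hx⟩
    | false =>
      have hxs : xs.any pvDelim = true := by
        simp only [List.any_cons, hx, Bool.false_or] at h; exact h
      obtain ⟨w, c, hw, hc⟩ := ih hxs
      exact ⟨x :: w, c, by simp [hw], hc⟩

lemma pvDelim_not_space (c : Char) (h : pvDelim c = true) :
    PySem.Chars.isspace c = false := by
  unfold pvDelim at h
  simp only [List.contains_eq_mem, List.mem_cons, List.not_mem_nil, or_false,
    decide_eq_true_eq] at h
  rcases h with h | h | h <;> subst h <;> decide

-- strip facts ------------------------------------------------------------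

lemma pvDropWhile_head {α : Type} (p : α → Bool) (l : List α) (c : α) (r : List α)
    (h : l.dropWhile p = c :: r) : p c = false := by
  induction l with
  | nil => simp at h
  | cons a as ih =>
    rw [List.dropWhile_cons] at h
    split at h
    · exact ih h
    · next hp =>
      injection h with h1 h2
      subst h1
      simpa using hp

lemma pvLstrip_cons_of_not_space (c : Char) (l : List Char)
    (h : PySem.Chars.isspace c = false) :
    PySem.Chars.lstrip (c :: l) = c :: l := by
  simp [PySem.Chars.lstrip, List.dropWhile_cons, h]

lemma pvRstrip_append_of_not_space (w : List Char) (d : Char)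
    (h : PySem.Chars.isspace d = false) :
    PySem.Chars.rstrip (w ++ [d]) = w ++ [d] := by
  simp [PySem.Chars.rstrip, List.dropWhile_cons, h]

-- a nonempty strip starts with a non-space character
lemma pvStrip_head (s : List Char) (h : PySem.Chars.strip s ≠ []) :
    ∃ c l, PySem.Chars.strip s = c :: l ∧ PySem.Chars.isspace c = false := by
  cases hs : PySem.Chars.strip s with
  | nil => exact absurd hs h
  | cons c l =>
    refine ⟨c, l, rfl, ?_⟩
    have hpre : PySem.Chars.strip s <+: PySem.Chars.lstrip s := by
      show (List.dropWhile PySem.Chars.isspace (PySem.Chars.lstrip s).reverse).reverse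
        <+: PySem.Chars.lstrip s
      have := List.reverse_prefix.mpr
        (List.dropWhile_suffix (l := (PySem.Chars.lstrip s).reverse) PySem.Chars.isspace)
      simpa using this
    rw [hs] at hpre
    obtain ⟨tl, htl⟩ := hpre
    refine pvDropWhile_head PySem.Chars.isspace s c (l ++ tl) ?_
    rw [show List.dropWhile PySem.Chars.isspace s = PySem.Chars.lstrip s from rfl, ← htl]
    simp

-- a nonempty strip ends with a non-space character
lemma pvStrip_last (s : List Char) (h : PySem.Chars.strip s ≠ []) :
    ∃ w d, PySem.Chars.strip s = w ++ [d] ∧ PySem.Chars.isspace d = false := by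
  cases hw : List.dropWhile PySem.Chars.isspace (PySem.Chars.lstrip s).reverse with
  | nil =>
    refine absurd ?_ h
    show (List.dropWhile PySem.Chars.isspace (PySem.Chars.lstrip s).reverse).reverse = []
    rw [hw]
    rfl
  | cons d m =>
    refine ⟨m.reverse, d, ?_, pvDropWhile_head _ _ _ _ hw⟩
    show (List.dropWhile PySem.Chars.isspace (PySem.Chars.lstrip s).reverse).reverse
      = m.reverse ++ [d]
    rw [hw]
    simp

lemma pvStrip_eq_self (s : List Char)
    (hhead : ∃ c l, s = c :: l ∧ PySem.Chars.isspace c = false)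
    (hlast : ∃ w d, s = w ++ [d] ∧ PySem.Chars.isspace d = false) :
    PySem.Chars.strip s = s := by
  obtain ⟨c, l, hcl, hc⟩ := hhead
  obtain ⟨w, d, hwd, hd⟩ := hlast
  show PySem.Chars.rstrip (PySem.Chars.lstrip s) = s
  rw [hcl, pvLstrip_cons_of_not_space c l hc, ← hcl, hwd,
      pvRstrip_append_of_not_space w d hd]

lemma pvStrip_strip (s : List Char) :
    PySem.Chars.strip (PySem.Chars.strip s) = PySem.Chars.strip s := by
  by_cases h : PySem.Chars.strip s = []
  · rw [h]; decide
  · exact pvStrip_eq_self _ (pvStrip_head s h) (pvStrip_last s h)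

lemma pvStrip_join_two (x y : List Char)
    (hx : PySem.Chars.strip x ≠ []) (hy : PySem.Chars.strip y ≠ []) :
    PySem.Chars.strip (PySem.Chars.strip x ++ ' ' :: PySem.Chars.strip y)
      = PySem.Chars.strip x ++ ' ' :: PySem.Chars.strip y := by
  obtain ⟨c, l, hcl, hc⟩ := pvStrip_head x hx
  obtain ⟨w, d, hwd, hd⟩ := pvStrip_last y hy
  refine pvStrip_eq_self _ ⟨c, l ++ ' ' :: PySem.Chars.strip y, by rw [hcl]; simp, hc⟩
    ⟨PySem.Chars.strip x ++ ' ' :: w, d, by rw [hwd]; simp, hd⟩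

-- the first chunk of a delimiter-containing list strips to a nonempty string
lemma pvStrip_chunk_ne_nil (pre t : List Char) (h : t.any pvDelim = true) :
    PySem.Chars.strip (pre ++ (pvSplitFirst t).1) ≠ [] := by
  obtain ⟨w, c, hw, hc⟩ := pvSplitFirst_last t h
  have hcsp := pvDelim_not_space c hc
  rw [hw, ← List.append_assoc]
  have hy : List.dropWhile PySem.Chars.isspace ((pre ++ w) ++ [c]) ≠ [] := by
    simp only [ne_eq, List.dropWhile_eq_nil_iff]
    intro hall
    have := hall c (by simp)
    rw [hcsp] at this
    simp at this
  obtain ⟨v, hv⟩ := List.dropWhile_suffix (l := (pre ++ w) ++ [c]) PySem.Chars.isspace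
  obtain ⟨z', e, hz'⟩ : ∃ z' e,
      List.dropWhile PySem.Chars.isspace ((pre ++ w) ++ [c]) = z' ++ [e] := by
    cases hzz : (List.dropWhile PySem.Chars.isspace ((pre ++ w) ++ [c])).reverse with
    | nil => exact absurd (by simpa using hzz) hy
    | cons x xs =>
      refine ⟨xs.reverse, x, ?_⟩
      rw [← List.reverse_reverse (List.dropWhile _ _), hzz]
      simp
  have he : e = c := by
    have h2 : (v ++ z') ++ [e] = (pre ++ w) ++ [c] := by
      rw [List.append_assoc, ← hz']
      exact hv
    have := congrArg List.getLast? h2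
    simpa using this
  show PySem.Chars.rstrip (PySem.Chars.lstrip ((pre ++ w) ++ [c])) ≠ []
  rw [show PySem.Chars.lstrip ((pre ++ w) ++ [c])
      = List.dropWhile PySem.Chars.isspace ((pre ++ w) ++ [c]) from rfl, hz', he,
      pvRstrip_append_of_not_space z' c hcsp]
  simp

-- join computations
lemma pvJoin_nil : PySem.Chars.join [' '] [] = [] := rfl
lemma pvJoin_one (a : List Char) : PySem.Chars.join [' '] [a] = a := by
  simp [PySem.Chars.join, List.intercalate]
lemma pvJoin_two (a b : List Char) :
    PySem.Chars.join [' '] [a, b] = a ++ ' ' :: b := by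
  simp [PySem.Chars.join, List.intercalate]

-- the heart: A's "strip(join(sentences[:2]))" equals B's "join(filter nonempty [s1, s2])"
lemma pvShort_eq (t : List Char) :
    PySem.Chars.strip (PySem.Chars.join [' ']
      (PySem.List.slice
        (if PySem.Chars.strip (t.foldl pvStepA ([], [])).2 ≠ []
         then (t.foldl pvStepA ([], [])).1 ++ [PySem.Chars.strip (t.foldl pvStepA ([], [])).2]
         else (t.foldl pvStepA ([], [])).1)
        none (some 2)))
    = PySem.Chars.join [' ']
        ([PySem.Chars.strip (pvSplitFirst t).1,
          PySem.Chars.strip (pvSplitFirst (pvSplitFirst t).2).1].filter (fun s => s ≠ [])) := by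
  have hslice : ∀ (l : List (List Char)), PySem.List.slice l none (some 2) = l.take 2 := by
    intro l
    rw [PySem.List.slice_to l (by norm_num : (0:Int) ≤ 2)]
    simp
  have hstripnil : PySem.Chars.strip ([] : List Char) = [] := rfl
  have hsplitnil : pvSplitFirst ([] : List Char) = ([], []) := rfl
  have hfilter2 : ∀ a b : List Char, a ≠ [] → b ≠ [] →
      [a, b].filter (fun s => s ≠ []) = [a, b] := by
    intro a b ha hb
    simp [List.filter_cons, ha, hb]
  have hfilter1 : ∀ a : List Char, a ≠ [] →
      [a, ([] : List Char)].filter (fun s => s ≠ []) = [a] := by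
    intro a ha
    simp [ha]
  by_cases h1 : t.any pvDelim = true
  · have hs1 : PySem.Chars.strip (pvSplitFirst t).1 ≠ [] := by
      have := pvStrip_chunk_ne_nil [] t h1
      simpa using this
    rw [pvFoldA_delim t h1 [] []]
    simp only [List.nil_append]
    set a := PySem.Chars.strip (pvSplitFirst t).1 with ha
    set r1 := (pvSplitFirst t).2 with hr1
    by_cases h2 : r1.any pvDelim = true
    · have hs2 : PySem.Chars.strip (pvSplitFirst r1).1 ≠ [] := by
        have := pvStrip_chunk_ne_nil [] r1 h2
        simpa using this
      rw [pvFoldA_delim r1 h2 [a] []]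
      simp only [List.nil_append]
      set b := PySem.Chars.strip (pvSplitFirst r1).1 with hb
      rw [pvFoldA_mono]
      dsimp only
      have htake : ∀ (z : List (List Char)), List.take 2 ([a] ++ [b] ++ z) = [a, b] := by
        intro z
        rw [List.take_append_of_le_length (l₁ := [a] ++ [b]) (by simp)]
        rfl
      rw [hfilter2 a b hs1 hs2, pvJoin_two]
      split
      · rw [hslice, List.append_assoc, htake, pvJoin_two]
        exact pvStrip_join_two _ _ hs1 hs2
      · rw [hslice, htake, pvJoin_two]
        exact pvStrip_join_two _ _ hs1 hs2
    · have h2' : r1.any pvDelim = false := by simpa using h2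
      rw [pvFoldA_no_delim r1 h2' [a] []]
      simp only [List.nil_append]
      have hsplit2 : pvSplitFirst r1 = (r1, []) := by
        unfold pvSplitFirst
        rw [List.findIdx?_eq_none_iff.mpr]
        intro x hx
        simpa [pvDelim] using (List.any_eq_false.mp h2') x hx
      rw [hsplit2]
      by_cases h3 : PySem.Chars.strip r1 = []
      · simp only [h3, ne_eq, not_true_eq_false, if_false, hslice]
        rw [show ([a] : List (List Char)).take 2 = [a] from rfl,
            pvJoin_one, hfilter1 a hs1, pvJoin_one]
        exact pvStrip_strip _
      · simp only [h3, ne_eq, not_false_eq_true, if_true, hslice]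
        rw [show ([a] ++ [PySem.Chars.strip r1]).take 2 = [a, PySem.Chars.strip r1] from rfl,
            pvJoin_two, hfilter2 a _ hs1 h3, pvJoin_two]
        exact pvStrip_join_two _ _ hs1 h3
  · have h1' : t.any pvDelim = false := by simpa using h1
    rw [pvFoldA_no_delim t h1' [] []]
    simp only [List.nil_append]
    have hsplit : pvSplitFirst t = (t, []) := by
      unfold pvSplitFirst
      rw [List.findIdx?_eq_none_iff.mpr]
      intro x hx
      simpa [pvDelim] using (List.any_eq_false.mp h1') x hx
    rw [hsplit]
    by_cases h3 : PySem.Chars.strip t = []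
    · simp only [h3, ne_eq, not_true_eq_false, if_false, hslice, hsplitnil, hstripnil]
      rw [show (([] : List (List Char))).take 2 = [] from rfl, pvJoin_nil]
      simp
      rfl
    · simp only [h3, ne_eq, not_false_eq_true, if_true, hslice, hsplitnil, hstripnil]
      rw [show List.take 2 [PySem.Chars.strip t] = [PySem.Chars.strip t] from rfl,
          pvJoin_one, hfilter1 _ h3, pvJoin_one]
      exact pvStrip_strip t

-- ===== VERDICT (by name: the statement is the Claim_ definition above) =====
theorem collapse_to_two_sentences_spec : Claim_equal_collapse_to_two_sentences := by
  intro text max_chars _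
  unfold Spec_collapse_to_two_sentences collapse_to_two_sentences collapse_to_two_sentences_alt
  by_cases htext : text = ""
  · rw [if_pos htext, if_pos htext]
  · rw [if_neg htext, if_neg htext]
    have hfun : (fun (st : List (List Char) × List Char) ch =>
        let tmp := st.2 ++ [ch]
        if ['.', '!', '?'].contains ch then (st.1 ++ [PySem.Chars.strip tmp], [])
        else (st.1, tmp)) = pvStepA := rfl
    rw [hfun]
    dsimp only
    rw [pvShort_eq (PySem.Chars.strip text.toList)]
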